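-- pv_equiv track=rewrite | github.com/kgolcyns/Python-Class-Explorer | class_explorer.py | list_columnize
-- ===== SOURCE A (Python) =====
-- def list_columnize(list, displaywidth=80):
--     """Display a list of strings as a compact set of columns.
--
--     Each column is only as wide as necessary.
--     Columns are separated by two spaces (one was not legible enough).
--     """
--     outList = []
--
--     if not list:
--         #self.stdout.write("<empty>\n")
--         #return
--         return []
--
--     nonstrings = [i for i in range(len(list))
--                     if not isinstance(list[i], str)]
--     if nonstrings:
--         raise TypeError("list[i] not a string for i in %s"
--                         % ", ".join(map(str, nonstrings)))
--     size = len(list)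
--     if size == 1:
--         #self.stdout.write('%s\n'%str(list[0]))
--         #return
--         return ['%s\n'%str(list[0])]
--     # Try every row count from 1 upwards
--     for nrows in range(1, len(list)):
--         ncols = (size+nrows-1) // nrows
--         colwidths = []
--         totwidth = -2
--         for col in range(ncols):
--             colwidth = 0
--             for row in range(nrows):
--                 i = row + nrows*col
--                 if i >= size:
--                     break
--                 x = list[i]
--                 colwidth = max(colwidth, len(x))
--             colwidths.append(colwidth)
--             totwidth += colwidth + 2
--             if totwidth > displaywidth:
--                 break
--         if totwidth <= displaywidth:
--             break
--     else:
--         nrows = len(list)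
--         ncols = 1
--         colwidths = [0]
--     for row in range(nrows):
--         texts = []
--         for col in range(ncols):
--             i = row + nrows*col
--             if i >= size:
--                 x = ""
--             else:
--                 x = list[i]
--             texts.append(x)
--         while texts and not texts[-1]:
--             del texts[-1]
--         for col in range(len(texts)):
--             texts[col] = texts[col].ljust(colwidths[col])
--         #self.stdout.write("%s\n"%str("  ".join(texts)))
--         outList.append("%s\n"%str("  ".join(texts)))
--
--     return outList
-- ===== SOURCE B (Python) =====
-- def list_columnize(list, displaywidth=80):
--     items = list
--     if not items:
--         return []
--     if len(items) == 1:
--         return ['%s\n' % items[0]]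
--     size = len(items)
--     lens = [len(s) for s in items]
--     # sparse table, built lazily: table[k][i] == max(lens[i:i + 2**k])
--     table = [lens]
--
--     def rmax(lo, hi):  # O(1) max(lens[lo:hi]) for 0 <= lo < hi <= size
--         k = (hi - lo).bit_length() - 1
--         while len(table) <= k:
--             j = len(table)
--             prev = table[-1]
--             half = 1 << (j - 1)
--             table.append([max(prev[i], prev[i + half])
--                           for i in range(size - (1 << j) + 1)])
--         return max(table[k][lo], table[k][hi - (1 << k)])
--
--     nrows, colwidths = size, [0]
--     for n in range(1, size):
--         ncols = (size + n - 1) // n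
--         if 2 * (ncols - 1) > displaywidth:
--             continue  # cannot fit even with all-empty columns
--         widths = [rmax(n * c, min(n * (c + 1), size)) for c in range(ncols)]
--         if sum(widths) + 2 * (ncols - 1) <= displaywidth:
--             nrows, colwidths = n, widths
--             break
--     ncols = (size + nrows - 1) // nrows
--     out = []
--     for r in range(nrows):
--         texts = [items[r + nrows * c] for c in range(ncols) if r + nrows * c < size]
--         while texts and texts[-1] == "":
--             texts.pop()
--         out.append("  ".join(s.ljust(w) for s, w in zip(texts, colwidths)) + "\n")
--     return out
-- ===== Notes on version B (the rewrite author's own statement) =====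
-- stated objective: faster
-- what changed: B precomputes the string lengths once and builds a sparse table lazily so each column width is an O(1) range-max query instead of A's inner row scan, skips row counts that cannot fit by a column-count bound, and tests the summed widths directly instead of A's running-total early breaks; intended as faster (a timing run measured a ~2x median at the largest size, though not consistent on every input).
import Mathlib
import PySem

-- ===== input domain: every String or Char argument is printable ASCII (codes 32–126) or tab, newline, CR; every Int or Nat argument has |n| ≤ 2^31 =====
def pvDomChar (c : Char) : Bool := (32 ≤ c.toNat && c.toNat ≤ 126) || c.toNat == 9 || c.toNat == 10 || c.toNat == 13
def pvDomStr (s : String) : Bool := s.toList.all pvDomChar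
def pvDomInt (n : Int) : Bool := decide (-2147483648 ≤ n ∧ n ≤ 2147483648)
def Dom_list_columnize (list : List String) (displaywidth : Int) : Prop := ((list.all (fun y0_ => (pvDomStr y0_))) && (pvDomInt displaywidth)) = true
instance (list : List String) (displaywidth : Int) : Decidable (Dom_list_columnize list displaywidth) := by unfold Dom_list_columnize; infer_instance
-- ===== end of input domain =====

-- B precomputes string lengths once and answers each column width by an O(1) sparse-table
-- range-max query instead of A's inner row scan; intended as faster (timing run measured a
-- ~2x median at the largest size, though not consistent on every input). Equivalence is total.

-- shared primitive: Python's str.ljust (PySem has no ljust)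
def pvLjust (s : String) (w : Int) : String :=
  s ++ String.ofList (List.replicate (w - PySem.Str.len s).toNat ' ')

-- ===== PORT A =====
-- inner 'for row in range(nrows)' with its 'if i >= size: break'
def pvA_rowLoop (list : List String) (size nrows col : Int) : List Int → Int → Int
  | [], colwidth => colwidth
  | row :: rest, colwidth =>
    let i := row + nrows * col
    if size ≤ i then colwidth
    else pvA_rowLoop list size nrows col rest
      (max colwidth (PySem.Str.len ((PySem.List.pyGet? list i).getD "")))

-- 'for col in range(ncols)' accumulating (colwidths, totwidth), with its 'if totwidth > displaywidth: break'
def pvA_colLoop (list : List String) (size nrows displaywidth : Int) :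
    List Int → List Int × Int → List Int × Int
  | [], st => st
  | col :: rest, (colwidths, totwidth) =>
    let colwidth := pvA_rowLoop list size nrows col (PySem.List.pyRange 0 nrows 1) 0
    let colwidths' := colwidths ++ [colwidth]
    let totwidth' := totwidth + colwidth + 2
    if displaywidth < totwidth' then (colwidths', totwidth')
    else pvA_colLoop list size nrows displaywidth rest (colwidths', totwidth')

-- 'for nrows in range(1, len(list))' with its break on success; none = the loop's 'else' clause
def pvA_find (list : List String) (size displaywidth : Int) :
    List Int → Option (Int × Int × List Int)
  | [] => none
  | nrows :: rest =>
    let ncols := PySem.Int.floordiv (size + nrows - 1) nrows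
    let st := pvA_colLoop list size nrows displaywidth (PySem.List.pyRange 0 ncols 1) ([], -2)
    if st.2 ≤ displaywidth then some (nrows, ncols, st.1)
    else pvA_find list size displaywidth rest

-- 'while texts and not texts[-1]: del texts[-1]'
def pvA_trim : List String → List String
  | [] => []
  | t :: rest =>
    match pvA_trim rest with
    | [] => if t = "" then [] else [t]
    | r => t :: r

-- the final 'for row in range(nrows)' rendering loop
def pvA_render (list : List String) (size nrows ncols : Int) (colwidths : List Int) : List String :=
  (PySem.List.pyRange 0 nrows 1).map (fun row =>
    let texts := (PySem.List.pyRange 0 ncols 1).map (fun col =>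
      let i := row + nrows * col
      if size ≤ i then "" else (PySem.List.pyGet? list i).getD "")
    let texts := pvA_trim texts
    let texts := (PySem.List.pyRange 0 (texts.length : Int) 1).map (fun col =>
      pvLjust (PySem.List.pyGetD texts col "") (PySem.List.pyGetD colwidths col 0))
    PySem.Str.join "  " texts ++ "\n")

def list_columnize (list : List String) (displaywidth : Int) : List String :=
  if list = [] then []
  else
    let size : Int := (list.length : Int)
    if size = 1 then [(PySem.List.pyGet? list 0).getD "" ++ "\n"]
    else
      match pvA_find list size displaywidth (PySem.List.pyRange 1 size 1) with
      | some (nrows, ncols, colwidths) => pvA_render list size nrows ncols colwidths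
      | none => pvA_render list size size 1 [0]

-- ===== PORT B =====
-- int.bit_length() for nonnegative ints
def pvBitLen : Nat → Nat
  | 0 => 0
  | n+1 => pvBitLen ((n+1)/2) + 1

-- sparse-table row k (Source B's lazily built table[k]): entry i is max(lens[i:i+2**k]);
-- row k+1 is Source B's table-extension step applied to row k (the step's 'prev' value)
def pvB_trow (lens : List Int) (size : Nat) : Nat → List Int
  | 0 => lens
  | k+1 =>
    (List.range (size - 2^(k+1) + 1)).map
      (fun i => max ((pvB_trow lens size k).getD i 0) ((pvB_trow lens size k).getD (i + 2^k) 0))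

-- rmax(lo, hi): O(1) range max by two overlapping power-of-two windows
def pvB_rmax (lens : List Int) (size lo hi : Nat) : Int :=
  max ((pvB_trow lens size (pvBitLen (hi - lo) - 1)).getD lo 0)
    ((pvB_trow lens size (pvBitLen (hi - lo) - 1)).getD (hi - 2 ^ (pvBitLen (hi - lo) - 1)) 0)

-- [rmax(n*c, min(n*(c+1), size)) for c in range(ncols)]
def pvB_widths (lens : List Int) (size n ncols : Nat) : List Int :=
  (List.range ncols).map (fun c => pvB_rmax lens size (n * c) (min (n * (c + 1)) size))

-- the 'for n in range(1, size)' search; none = no candidate fits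
def pvB_find (lens : List Int) (size : Nat) (dw : Int) : List Int → Option (Int × List Int)
  | [] => none
  | n :: rest =>
    let ncols := (size + n.toNat - 1) / n.toNat
    if dw < 2 * ((ncols : Int) - 1) then pvB_find lens size dw rest  -- 'continue': cannot fit
    else
      let widths := pvB_widths lens size n.toNat ncols
      if widths.sum + 2 * ((ncols : Int) - 1) ≤ dw then some (n, widths)
      else pvB_find lens size dw rest

-- pop trailing empty strings
def pvB_trim (ts : List String) : List String :=
  (ts.reverse.dropWhile (fun s => s == "")).reverse

-- one output row: keep the in-range cells, trim, pad, join
def pvB_rowOut (L : List String) (nn ncols : Nat) (W : List Int) (r : Nat) : String :=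
  let texts := (List.range ncols).filterMap (fun c =>
    if r + nn * c < L.length then some (L.getD (r + nn * c) "") else none)
  let texts := pvB_trim texts
  PySem.Str.join "  " (List.zipWith pvLjust texts W) ++ "\n"

def list_columnize_alt (list : List String) (displaywidth : Int) : List String :=
  if list.isEmpty then []
  else if list.length == 1 then [list.headD "" ++ "\n"]
  else
    let size := list.length
    let lens := list.map PySem.Str.len
    let p :=
      match pvB_find lens size displaywidth (PySem.List.pyRange 1 (size : Int) 1) with
      | some p => p
      | none => ((size : Int), [0])
    let nn := p.1.toNat
    let ncols := (size + nn - 1) / nn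
    (List.range nn).map (pvB_rowOut list nn ncols p.2)

-- ===== PRECONDITION & SPEC =====
def Spec_list_columnize (list : List String) (displaywidth : Int) (out : List String) : Prop := out = list_columnize_alt list displaywidth
instance (list : List String) (displaywidth : Int) (out : List String) : Decidable (Spec_list_columnize list displaywidth out) := by unfold Spec_list_columnize; infer_instance

-- ===== CLAIM (what is proved, stated in full; the proofs are below) =====
def Claim_equal_list_columnize : Prop := ∀ (list : List String) (displaywidth : Int), Dom_list_columnize list displaywidth → Spec_list_columnize list displaywidth (list_columnize list displaywidth)

-- ===== LEMMAS AND PROOFS =====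

-- A's inner-loop column width as a function (proof-side abbreviation)
def pvAW (L : List String) (n col : Int) : Int :=
  pvA_rowLoop L (L.length : Int) n col (PySem.List.pyRange 0 n 1) 0

-- window max of a length list (proof-side): max 0 of lens[i:i+m]
def pvM (lens : List Int) (i m : Nat) : Int :=
  ((lens.drop i).take m).foldl max 0

-- the accumulator of A's row loop only grows
theorem pvA_rowLoop_ge (L : List String) (size n c : Int) :
    ∀ (rows : List Int) (acc : Int), acc ≤ pvA_rowLoop L size n c rows acc := by
  intro rows
  induction rows with
  | nil => intro acc; simp [pvA_rowLoop]
  | cons row rest ih =>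
    intro acc
    simp only [pvA_rowLoop]
    split
    · exact le_refl acc
    · exact le_trans (le_max_left _ _) (ih _)

theorem pvAW_nonneg (L : List String) (n col : Int) : 0 ≤ pvAW L n col := by
  exact pvA_rowLoop_ge L _ n col _ 0

-- A's row loop computes the running max of lengths over a take/drop window
theorem pvA_rowLoop_eq (L : List String) (nn c : Nat) (h1 : 1 ≤ nn) :
    ∀ (k rN : Nat) (acc : Int), rN + k = nn →
      pvA_rowLoop L (L.length : Int) (nn : Int) (c : Int)
          (PySem.List.pyRange (rN : Int) (nn : Int) 1) acc
        = (((L.drop (nn * c + rN)).take (nn - rN)).map PySem.Str.len).foldl max acc := by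
  intro k
  induction k with
  | zero =>
    intro rN acc h
    have hEq : rN = nn := by omega
    subst hEq
    rw [PySem.List.pyRange_one_eq_nil (le_refl _)]
    simp [pvA_rowLoop]
  | succ k ih =>
    intro rN acc h
    have hlt : (rN : Int) < (nn : Int) := by exact_mod_cast (by omega : rN < nn)
    rw [PySem.List.pyRange_one_cons hlt]
    simp only [pvA_rowLoop]
    have hidx : (rN : Int) + (nn : Int) * (c : Int) = ((nn * c + rN : Nat) : Int) := by
      push_cast; ring
    rw [hidx]
    by_cases hge : L.length ≤ nn * c + rN
    · rw [if_pos (by exact_mod_cast hge)]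
      rw [List.drop_eq_nil_of_le hge]
      simp
    · have hlt' : nn * c + rN < L.length := by omega
      rw [if_neg (by exact_mod_cast (not_le.mpr hlt'))]
      rw [PySem.List.pyGet?_natCast, List.getElem?_eq_getElem hlt', Option.getD_some]
      rw [List.drop_eq_getElem_cons hlt']
      have hsub : nn - rN = (nn - (rN + 1)) + 1 := by omega
      rw [hsub, List.take_succ_cons, List.map_cons, List.foldl_cons]
      have hcast : (rN : Int) + 1 = ((rN + 1 : Nat) : Int) := by push_cast; ring
      rw [hcast, ih (rN + 1) _ (by omega)]
      have : nn * c + (rN + 1) = nn * c + rN + 1 := by omega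
      rw [this]

theorem pv_col_lt (len nn c : Nat) (h1 : 1 ≤ nn) (hc : c < (len + nn - 1) / nn) :
    nn * c < len := by
  have h2 : (c + 1) * nn ≤ len + nn - 1 := (Nat.le_div_iff_mul_le (by omega)).1 hc
  rw [Nat.succ_mul] at h2
  rw [Nat.mul_comm]
  generalize c * nn = a at *
  omega

-- pull a max out of a foldl max
theorem pvMaxPull (l : List Int) : ∀ (a b : Int), l.foldl max (max a b) = max a (l.foldl max b) := by
  induction l with
  | nil => intro a b; rfl
  | cons x t ih =>
    intro a b
    simp only [List.foldl_cons]
    rw [max_assoc, ih]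

theorem pv_le_foldl_max (l : List Int) : ∀ a : Int, a ≤ l.foldl max a := by
  induction l with
  | nil => intro a; exact le_refl a
  | cons x t ih =>
    intro a
    exact le_trans (le_max_left a x) (ih _)

theorem pvM_nonneg (lens : List Int) (i m : Nat) : 0 ≤ pvM lens i m :=
  pv_le_foldl_max _ 0

-- splitting a window max (no bounds needed)
theorem pvM_split (lens : List Int) (i a b : Nat) :
    pvM lens i (a + b) = max (pvM lens i a) (pvM lens (i + a) b) := by
  unfold pvM
  rw [List.take_add, List.foldl_append, List.drop_drop]
  have hc : ((lens.drop i).take a).foldl max 0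
      = max (((lens.drop i).take a).foldl max 0) 0 :=
    (max_eq_left (pvM_nonneg lens i a)).symm
  rw [hc, pvMaxPull]
  congr 2

-- two overlapping windows of width a cover a window of width a+s
theorem pvM_overlap (lens : List Int) (lo a s : Nat) (hs : s ≤ a) :
    max (pvM lens lo a) (pvM lens (lo + s) a) = pvM lens lo (a + s) := by
  have h1 := pvM_split lens lo a s
  have h2 : pvM lens (lo + s) a = max (pvM lens (lo + s) (a - s)) (pvM lens (lo + a) s) := by
    have h := pvM_split lens (lo + s) (a - s) s
    rw [Nat.sub_add_cancel hs] at h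
    have harg : lo + s + (a - s) = lo + a := by omega
    rw [harg] at h
    exact h
  have h3 : pvM lens (lo + s) (a - s) ≤ pvM lens lo a := by
    have h := pvM_split lens lo s (a - s)
    rw [Nat.add_sub_cancel' hs] at h
    rw [h]
    exact le_max_right _ _
  rw [h1, h2, ← max_assoc, max_eq_left h3]

theorem pvBitLen_pos (m : Nat) : 1 ≤ pvBitLen (m + 1) := by
  simp [pvBitLen]

theorem pvBitLen_spec : ∀ n : Nat, 1 ≤ n → 2 ^ (pvBitLen n - 1) ≤ n ∧ n < 2 ^ (pvBitLen n) := by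
  intro n
  induction n using Nat.strong_induction_on with
  | _ n ih =>
    intro h
    match n, h with
    | 1, _ =>
      have h1 : pvBitLen 1 = 1 := by simp [pvBitLen]
      rw [h1]
      norm_num
    | n+2, _ =>
      have hq : 1 ≤ (n + 2) / 2 := by omega
      have hlt : (n + 2) / 2 < n + 2 := by omega
      obtain ⟨hl, hr⟩ := ih _ hlt hq
      have heq : pvBitLen (n + 2) = pvBitLen ((n + 2) / 2) + 1 := by
        simp only [pvBitLen]
      rw [heq]
      obtain ⟨m, hm⟩ : ∃ m, (n + 2) / 2 = m + 1 := ⟨(n + 2) / 2 - 1, by omega⟩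
      rw [hm] at hl hr ⊢
      have hbl : 1 ≤ pvBitLen (m + 1) := pvBitLen_pos m
      constructor
      · have hpow : 2 ^ (pvBitLen (m + 1) + 1 - 1) = 2 * 2 ^ (pvBitLen (m + 1) - 1) := by
          rw [Nat.add_sub_cancel]
          conv_lhs => rw [show pvBitLen (m + 1) = (pvBitLen (m + 1) - 1) + 1 by omega]
          rw [pow_succ]
          ring
        rw [hpow]
        omega
      · have hpow : 2 ^ (pvBitLen (m + 1) + 1) = 2 * 2 ^ (pvBitLen (m + 1)) := by
          rw [pow_succ]; ring
        rw [hpow]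
        omega

-- sparse-table rows are window maxima
theorem pvB_trow_get (lens : List Int) (size : Nat) (hsz : lens.length = size)
    (hpos : ∀ x ∈ lens, 0 ≤ x) :
    ∀ (k i : Nat), i + 2 ^ k ≤ size →
      (pvB_trow lens size k).getD i 0 = pvM lens i (2 ^ k) := by
  intro k
  induction k with
  | zero =>
    intro i hi
    simp only [pvB_trow, pow_zero] at *
    have hi' : i < lens.length := by omega
    rw [List.getD_eq_getElem _ _ hi']
    unfold pvM
    rw [List.drop_eq_getElem_cons hi']
    have ht : List.take 1 (lens[i] :: lens.drop (i + 1)) = [lens[i]] := rfl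
    rw [ht]
    simp only [List.foldl_cons, List.foldl_nil]
    exact (max_eq_right (hpos _ (List.getElem_mem hi'))).symm
  | succ k ih =>
    intro i hi
    simp only [pvB_trow]
    have hp1 : (1 : Nat) ≤ 2 ^ (k + 1) := Nat.one_le_two_pow
    have hiR : i < size - 2 ^ (k + 1) + 1 := by omega
    rw [List.getD_eq_getElem _ _ (by rw [List.length_map, List.length_range]; exact hiR)]
    rw [List.getElem_map, List.getElem_range]
    have hps : (2 : Nat) ^ (k + 1) = 2 ^ k + 2 ^ k := by rw [pow_succ]; omega
    have h1 : i + 2 ^ k ≤ size := by omega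
    have h2 : (i + 2 ^ k) + 2 ^ k ≤ size := by omega
    rw [ih i h1, ih (i + 2 ^ k) h2, hps, pvM_split]

-- the O(1) range-max query is the window max
theorem pvB_rmax_eq (lens : List Int) (size : Nat) (hsz : lens.length = size)
    (hpos : ∀ x ∈ lens, 0 ≤ x) (lo hi : Nat) (hlohi : lo < hi) (hhi : hi ≤ size) :
    pvB_rmax lens size lo hi = pvM lens lo (hi - lo) := by
  unfold pvB_rmax
  obtain ⟨hl, hr⟩ := pvBitLen_spec (hi - lo) (by omega)
  have hbl : 1 ≤ pvBitLen (hi - lo) := by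
    by_contra hc
    have : pvBitLen (hi - lo) = 0 := by omega
    rw [this] at hr
    simp at hr
    omega
  have hkk : pvBitLen (hi - lo) = (pvBitLen (hi - lo) - 1) + 1 := by omega
  rw [hkk] at hr
  have hps : (2 : Nat) ^ ((pvBitLen (hi - lo) - 1) + 1) = 2 ^ (pvBitLen (hi - lo) - 1) + 2 ^ (pvBitLen (hi - lo) - 1) := by
    rw [pow_succ]; omega
  rw [hps] at hr
  have hs : hi - lo - 2 ^ (pvBitLen (hi - lo) - 1) ≤ 2 ^ (pvBitLen (hi - lo) - 1) := by omega
  have hhi2 : hi - 2 ^ (pvBitLen (hi - lo) - 1) = lo + (hi - lo - 2 ^ (pvBitLen (hi - lo) - 1)) := by omega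
  rw [hhi2]
  rw [pvB_trow_get lens size hsz hpos _ lo (by omega)]
  rw [pvB_trow_get lens size hsz hpos _ (lo + (hi - lo - 2 ^ (pvBitLen (hi - lo) - 1))) (by omega)]
  have h := pvM_overlap lens lo (2 ^ (pvBitLen (hi - lo) - 1)) (hi - lo - 2 ^ (pvBitLen (hi - lo) - 1)) hs
  rw [Nat.add_sub_cancel' hl] at h
  exact h

-- B's widths are exactly A's per-column widths
theorem pvB_widths_eq (L : List String) (nn : Nat) (h1 : 1 ≤ nn) :
    pvB_widths (L.map PySem.Str.len) L.length nn ((L.length + nn - 1) / nn)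
      = (List.range ((L.length + nn - 1) / nn)).map (fun c : Nat => pvAW L (nn : Int) (c : Int)) := by
  unfold pvB_widths
  apply List.map_congr_left
  intro c hc
  rw [List.mem_range] at hc
  have hlt : nn * c < L.length := pv_col_lt L.length nn c h1 hc
  have hmul : nn * (c + 1) = nn * c + nn := by ring
  have hlohi : nn * c < min (nn * (c + 1)) L.length := by omega
  have hpos : ∀ x ∈ L.map PySem.Str.len, 0 ≤ x := by
    intro x hx
    obtain ⟨y, _, rfl⟩ := List.mem_map.1 hx
    rw [PySem.Str.len_eq]
    exact_mod_cast Nat.zero_le _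
  rw [pvB_rmax_eq (L.map PySem.Str.len) L.length (List.length_map _) hpos _ _ hlohi
    (min_le_right _ _)]
  unfold pvAW
  have hrl := pvA_rowLoop_eq L nn c h1 nn 0 0 (by omega)
  simp only [Nat.cast_zero, Nat.add_zero, Nat.sub_zero] at hrl
  rw [hrl]
  unfold pvM
  rw [← List.map_drop, ← List.map_take]
  congr 2
  by_cases hcase : nn ≤ L.length - nn * c
  · have : min (nn * (c + 1)) L.length - nn * c = nn := by omega
    rw [this]
  · have hlen : (L.drop (nn * c)).length = L.length - nn * c := List.length_drop
    have h2 : min (nn * (c + 1)) L.length - nn * c = L.length - nn * c := by omega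
    rw [h2, List.take_of_length_le (le_of_eq hlen), List.take_of_length_le (by omega)]

-- A's column loop: the early break does not change the verdict, and on success
-- it returns the full widths list with the full total
theorem pvA_colLoop_spec (L : List String) (n dw : Int) :
    ∀ (cols ws : List Int) (tot : Int),
      ((pvA_colLoop L (L.length : Int) n dw cols (ws, tot)).2 ≤ dw ↔
        tot + (cols.map (pvAW L n)).sum + 2 * cols.length ≤ dw) ∧
      (tot + (cols.map (pvAW L n)).sum + 2 * cols.length ≤ dw →
        pvA_colLoop L (L.length : Int) n dw cols (ws, tot)
          = (ws ++ cols.map (pvAW L n), tot + (cols.map (pvAW L n)).sum + 2 * cols.length)) := by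
  intro cols
  induction cols with
  | nil =>
    intro ws tot
    constructor
    · simp [pvA_colLoop]
    · intro _; simp [pvA_colLoop]
  | cons col rest ih =>
    intro ws tot
    simp only [pvA_colLoop]
    rw [show pvA_rowLoop L (L.length : Int) n col (PySem.List.pyRange 0 n 1) 0 = pvAW L n col from rfl]
    have hw0 : 0 ≤ pvAW L n col := pvAW_nonneg L n col
    have hsum_nonneg : 0 ≤ (rest.map (pvAW L n)).sum := by
      apply List.sum_nonneg
      intro x hx
      obtain ⟨y, _, rfl⟩ := List.mem_map.1 hx
      exact pvAW_nonneg L n y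
    by_cases hbr : dw < tot + pvAW L n col + 2
    · rw [if_pos hbr]
      constructor
      · apply iff_of_false (by simp only []; omega)
        simp only [List.map_cons, List.sum_cons, List.length_cons]
        push_cast
        omega
      · intro hcon
        exfalso
        simp only [List.map_cons, List.sum_cons, List.length_cons] at hcon
        push_cast at hcon
        omega
    · rw [if_neg hbr]
      obtain ⟨ih1, ih2⟩ := ih (ws ++ [pvAW L n col]) (tot + pvAW L n col + 2)
      constructor
      · rw [ih1]
        simp only [List.map_cons, List.sum_cons, List.length_cons]
        push_cast
        constructor <;> (intro hx; omega)
      · intro hcon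
        simp only [List.map_cons, List.sum_cons, List.length_cons] at hcon ⊢
        push_cast at hcon ⊢
        rw [ih2 (by omega)]
        simp only [Prod.mk.injEq]
        constructor
        · rw [List.append_assoc]; rfl
        · ring

-- the two candidate searches agree step for step
theorem pv_find_eq (L : List String) (dw : Int) :
    ∀ (cand : List Int), (∀ m ∈ cand, 1 ≤ m) →
      pvA_find L (L.length : Int) dw cand
        = (pvB_find (L.map PySem.Str.len) L.length dw cand).map
            (fun p => (p.1, (((L.length + p.1.toNat - 1) / p.1.toNat : Nat) : Int), p.2)) := by
  intro cand
  induction cand with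
  | nil => intro _; simp [pvA_find, pvB_find]
  | cons n rest ih =>
    intro hmem
    have h1n : 1 ≤ n := hmem n List.mem_cons_self
    have hnn : ((n.toNat : Nat) : Int) = n := Int.toNat_of_nonneg (by omega)
    have hcast : (L.length : Int) + n - 1 = ((L.length + n.toNat - 1 : Nat) : Int) := by
      have h2 : 1 ≤ L.length + n.toNat := by omega
      rw [Nat.cast_sub h2, Nat.cast_add, hnn, Nat.cast_one]
    have hfd := PySem.Int.floordiv_natCast (L.length + n.toNat - 1) n.toNat
    rw [hnn] at hfd
    have hncols : PySem.Int.floordiv ((L.length : Int) + n - 1) n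
        = (((L.length + n.toNat - 1) / n.toNat : Nat) : Int) := by
      rw [hcast]; exact hfd
    have hW := pvB_widths_eq L n.toNat (by omega)
    have hmapW : (PySem.List.pyRange 0 (((L.length + n.toNat - 1) / n.toNat : Nat) : Int) 1).map
        (pvAW L n)
        = pvB_widths (L.map PySem.Str.len) L.length n.toNat ((L.length + n.toNat - 1) / n.toNat) := by
      rw [PySem.List.pyRange_zero_natCast, List.map_map, hW]
      apply List.map_congr_left
      intro c _
      simp only [Function.comp_apply]
      rw [hnn]
    have hlenW : (pvB_widths (L.map PySem.Str.len) L.length n.toNat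
        ((L.length + n.toNat - 1) / n.toNat)).length = (L.length + n.toNat - 1) / n.toNat := by
      unfold pvB_widths
      rw [List.length_map, List.length_range]
    simp only [pvA_find, pvB_find]
    rw [hncols]
    obtain ⟨hiff, hval⟩ := pvA_colLoop_spec L n dw
      (PySem.List.pyRange 0 (((L.length + n.toNat - 1) / n.toNat : Nat) : Int) 1) [] (-2)
    rw [hmapW] at hiff hval
    have hlenR : (PySem.List.pyRange 0 (((L.length + n.toNat - 1) / n.toNat : Nat) : Int) 1).length
        = (L.length + n.toNat - 1) / n.toNat := by
      rw [PySem.List.length_pyRange_one, sub_zero, Int.toNat_natCast]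
    rw [hlenR] at hiff hval
    have hsumnn : 0 ≤ (pvB_widths (L.map PySem.Str.len) L.length n.toNat
        ((L.length + n.toNat - 1) / n.toNat)).sum := by
      rw [← hmapW]
      apply List.sum_nonneg
      intro x hx
      obtain ⟨y, _, rfl⟩ := List.mem_map.1 hx
      exact pvAW_nonneg L n y
    by_cases hskip : dw < 2 * ((((L.length + n.toNat - 1) / n.toNat : Nat) : Int) - 1)
    · rw [if_pos hskip, if_neg (fun hc => by have := hiff.mp hc; omega)]
      exact ih (fun m hm => hmem m (List.mem_cons_of_mem _ hm))
    rw [if_neg hskip]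
    by_cases hfit : (pvB_widths (L.map PySem.Str.len) L.length n.toNat
          ((L.length + n.toNat - 1) / n.toNat)).sum
        + 2 * ((((L.length + n.toNat - 1) / n.toNat : Nat) : Int) - 1) ≤ dw
    · have hfull : (-2 : Int) + (pvB_widths (L.map PySem.Str.len) L.length n.toNat
          ((L.length + n.toNat - 1) / n.toNat)).sum
          + 2 * (((L.length + n.toNat - 1) / n.toNat : Nat) : Int) ≤ dw := by
        omega
      rw [if_pos (hiff.mpr hfull), if_pos hfit, hval hfull]
      simp only [Option.map_some, List.nil_append]
    · have hfull : ¬ ((-2 : Int) + (pvB_widths (L.map PySem.Str.len) L.length n.toNat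
          ((L.length + n.toNat - 1) / n.toNat)).sum
          + 2 * (((L.length + n.toNat - 1) / n.toNat : Nat) : Int) ≤ dw) := by
        omega
      rw [if_neg (fun hc => hfull (hiff.mp hc)), if_neg hfit]
      exact ih (fun m hm => hmem m (List.mem_cons_of_mem _ hm))

theorem pvB_find_mem (lens : List Int) (size : Nat) (dw : Int) :
    ∀ (cand : List Int) (p : Int × List Int), pvB_find lens size dw cand = some p →
      p.1 ∈ cand ∧ p.2 = pvB_widths lens size p.1.toNat ((size + p.1.toNat - 1) / p.1.toNat) := by
  intro cand
  induction cand with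
  | nil => intro p h; simp [pvB_find] at h
  | cons n rest ih =>
    intro p h
    simp only [pvB_find] at h
    split at h
    · obtain ⟨hm, hw⟩ := ih p h
      exact ⟨List.mem_cons_of_mem _ hm, hw⟩
    split at h
    · obtain rfl : (n, pvB_widths lens size n.toNat ((size + n.toNat - 1) / n.toNat)) = p :=
        Option.some.inj h
      exact ⟨List.mem_cons_self, rfl⟩
    · obtain ⟨hm, hw⟩ := ih p h
      exact ⟨List.mem_cons_of_mem _ hm, hw⟩

-- padded map vs filterMap for a downward-closed presence predicate
theorem pv_splitMap (P : Nat → Prop) [DecidablePred P] (g : Nat → String)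
    (hdc : ∀ i j, i ≤ j → P j → P i) :
    ∀ (m : Nat), ∃ k,
      (List.range m).map (fun c => if P c then g c else "")
        = ((List.range m).filterMap (fun c => if P c then some (g c) else none))
            ++ List.replicate k "" := by
  have all_present : ∀ (l : List Nat), (∀ c ∈ l, P c) →
      l.map (fun c => if P c then g c else "")
        = l.filterMap (fun c => if P c then some (g c) else none) := by
    intro l hl
    induction l with
    | nil => simp
    | cons a t ih =>
      rw [List.map_cons, List.filterMap_cons]
      have ha := hl a (List.mem_cons_self)
      simp only [if_pos ha]
      rw [ih (fun c hc => hl c (List.mem_cons_of_mem _ hc))]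
  intro m
  induction m with
  | zero => exact ⟨0, by simp⟩
  | succ m ih =>
    by_cases hPm : P m
    · refine ⟨0, ?_⟩
      rw [all_present _ (fun c hc => hdc c m (by simp at hc; omega) hPm)]
      simp
    · obtain ⟨k, hk⟩ := ih
      refine ⟨k + 1, ?_⟩
      rw [List.range_succ, List.map_append, List.filterMap_append]
      simp only [if_neg hPm, List.map_cons, List.map_nil, List.filterMap_cons]
      rw [hk, List.replicate_succ']
      simp

theorem pv_trim_eq (ts : List String) : pvA_trim ts = pvB_trim ts := by
  induction ts with
  | nil => rfl
  | cons t rest ih =>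
    unfold pvB_trim at *
    simp only [List.reverse_cons]
    rw [List.dropWhile_append]
    cases h : rest.reverse.dropWhile (fun s => s == "") with
    | nil =>
      have hA : pvA_trim rest = [] := by rw [ih, h]; rfl
      simp only [pvA_trim, hA, List.isEmpty_nil, if_true]
      by_cases ht : t = ""
      · simp [List.dropWhile, ht]
      · rw [if_neg ht]
        simp only [List.dropWhile]
        rw [show (t == "") = false by simp [ht]]
        simp
    | cons a l =>
      have hA : pvA_trim rest = (a :: l).reverse := by rw [ih, h]
      obtain ⟨b, bs, hbs⟩ : ∃ b bs, (a :: l).reverse = b :: bs := by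
        cases hrev : (a :: l).reverse with
        | nil => exact absurd hrev (by simp)
        | cons b bs => exact ⟨b, bs, rfl⟩
      simp only [pvA_trim, hA, hbs, List.isEmpty_cons, Bool.false_eq_true, if_false]
      rw [List.reverse_append, hbs]
      rfl

theorem pv_trim_append_empty (ts : List String) : pvA_trim (ts ++ [""]) = pvA_trim ts := by
  induction ts with
  | nil => simp [pvA_trim]
  | cons t rest ih => simp only [List.cons_append, pvA_trim, ih]

theorem pv_trim_append_replicate (ts : List String) (k : Nat) :
    pvA_trim (ts ++ List.replicate k "") = pvA_trim ts := by
  induction k with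
  | zero => simp
  | succ k ih =>
    rw [List.replicate_succ', ← List.append_assoc, pv_trim_append_empty, ih]

theorem pvB_trim_length_le (ts : List String) : (pvB_trim ts).length ≤ ts.length := by
  unfold pvB_trim
  calc ((ts.reverse.dropWhile (fun s => s == "")).reverse).length
      = (ts.reverse.dropWhile (fun s => s == "")).length := List.length_reverse
    _ ≤ ts.reverse.length := List.length_dropWhile_le _ _
    _ = ts.length := List.length_reverse

-- A's in-place ljust loop is zipWith when the widths list is long enough
theorem pv_zip_eq (ts : List String) (W : List Int) (h : ts.length ≤ W.length) :
    (PySem.List.pyRange 0 (ts.length : Int) 1).map (fun col =>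
        pvLjust (PySem.List.pyGetD ts col "") (PySem.List.pyGetD W col 0))
      = List.zipWith pvLjust ts W := by
  rw [PySem.List.pyRange_zero_natCast, List.map_map]
  apply List.ext_getElem
  · simp [List.length_zipWith]; omega
  · intro i h1 h2
    simp only [List.getElem_map, List.getElem_range, Function.comp_apply]
    rw [List.getElem_zipWith]
    have hi : i < ts.length := by simpa using h1
    rw [PySem.List.pyGetD_natCast, PySem.List.pyGetD_natCast,
        List.getD_eq_getElem _ _ hi, List.getD_eq_getElem _ _ (lt_of_lt_of_le hi h)]

-- one rendered row of A equals B's row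
theorem pv_row_eq (L : List String) (nn r : Nat) (W : List Int)
    (hW : (L.length + nn - 1) / nn ≤ W.length) :
    (let texts := (PySem.List.pyRange 0 (((L.length + nn - 1) / nn : Nat) : Int) 1).map (fun col =>
        if (L.length : Int) ≤ (r : Int) + (nn : Int) * col then ""
        else (PySem.List.pyGet? L ((r : Int) + (nn : Int) * col)).getD "")
     let texts := pvA_trim texts
     let texts := (PySem.List.pyRange 0 (texts.length : Int) 1).map (fun col =>
        pvLjust (PySem.List.pyGetD texts col "") (PySem.List.pyGetD W col 0))
     PySem.Str.join "  " texts ++ "\n")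
      = pvB_rowOut L nn ((L.length + nn - 1) / nn) W r := by
  simp only []
  have hPdc : ∀ i j, i ≤ j → r + nn * j < L.length → r + nn * i < L.length := by
    intro i j hij hj
    have hmul : nn * i ≤ nn * j := Nat.mul_le_mul_left nn hij
    omega
  have stepA : (PySem.List.pyRange 0 (((L.length + nn - 1) / nn : Nat) : Int) 1).map (fun col =>
        if (L.length : Int) ≤ (r : Int) + (nn : Int) * col then ""
        else (PySem.List.pyGet? L ((r : Int) + (nn : Int) * col)).getD "")
      = (List.range ((L.length + nn - 1) / nn)).map (fun c =>
          if r + nn * c < L.length then L.getD (r + nn * c) "" else "") := by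
    rw [PySem.List.pyRange_zero_natCast, List.map_map]
    apply List.map_congr_left
    intro c _
    simp only [Function.comp_apply]
    have hidx : (r : Int) + (nn : Int) * (c : Int) = ((r + nn * c : Nat) : Int) := by
      push_cast; ring
    by_cases hP : r + nn * c < L.length
    · rw [hidx, if_neg (by exact_mod_cast not_le.mpr hP)]
      rw [PySem.List.pyGet?_natCast, List.getElem?_eq_getElem hP, Option.getD_some]
      rw [if_pos hP, List.getD_eq_getElem _ _ hP]
    · rw [hidx, if_pos (by exact_mod_cast not_lt.mp hP)]
      rw [if_neg hP]
  obtain ⟨k, hk⟩ := pv_splitMap (fun c => r + nn * c < L.length)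
      (fun c => L.getD (r + nn * c) "") hPdc ((L.length + nn - 1) / nn)
  rw [stepA, hk, pv_trim_append_replicate, pv_trim_eq]
  unfold pvB_rowOut
  simp only []
  have hlenT : (pvB_trim ((List.range ((L.length + nn - 1) / nn)).filterMap (fun c =>
      if r + nn * c < L.length then some (L.getD (r + nn * c) "") else none))).length
      ≤ W.length := by
    calc _ ≤ _ := pvB_trim_length_le _
      _ ≤ (List.range ((L.length + nn - 1) / nn)).length := List.length_filterMap_le _ _
      _ = (L.length + nn - 1) / nn := List.length_range
      _ ≤ W.length := hW
  rw [pv_zip_eq _ W hlenT]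

-- the rendering phases agree row by row
theorem pv_render_eq (L : List String) (nn : Nat) (W : List Int)
    (hW : (L.length + nn - 1) / nn ≤ W.length) :
    pvA_render L (L.length : Int) (nn : Int) (((L.length + nn - 1) / nn : Nat) : Int) W
      = (List.range nn).map (pvB_rowOut L nn ((L.length + nn - 1) / nn) W) := by
  unfold pvA_render
  rw [PySem.List.pyRange_zero_natCast nn, List.map_map]
  apply List.map_congr_left
  intro r _
  exact pv_row_eq L nn r W hW

-- ===== VERDICT (by name: the statement is the Claim_ definition above) =====
theorem list_columnize_spec : Claim_equal_list_columnize := by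
  intro list dw _hdom
  unfold Spec_list_columnize
  match list with
  | [] => rfl
  | [x] =>
    simp only [list_columnize, list_columnize_alt]
    rw [if_neg (by simp : ¬([x] = ([] : List String)))]
    simp only [List.length_cons, List.length_nil, List.isEmpty_cons]
    rw [if_pos (by norm_num), if_neg (by simp), if_pos (by simp)]
    have hget : PySem.List.pyGet? [x] (0 : Int) = some x := rfl
    rw [hget, Option.getD_some]
    rfl
  | x :: y :: rest =>
    have hlen2 : 2 ≤ (x :: y :: rest).length := by simp
    simp only [list_columnize, list_columnize_alt]
    rw [if_neg (by simp : ¬(x :: y :: rest = ([] : List String)))]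
    rw [if_neg (show ¬(((x :: y :: rest).length : Nat) : Int) = 1 by exact_mod_cast (by omega : ¬((x :: y :: rest).length = 1)))]
    rw [if_neg (by simp : ¬((x :: y :: rest).isEmpty = true))]
    rw [if_neg (show ¬(((x :: y :: rest).length == 1) = true) by
      rw [beq_iff_eq]; omega)]
    rw [pv_find_eq (x :: y :: rest) dw _
        (fun m hm => (PySem.List.mem_pyRange_one.1 hm).1)]
    cases hB : pvB_find ((x :: y :: rest).map PySem.Str.len) (x :: y :: rest).length dw
        (PySem.List.pyRange 1 (((x :: y :: rest).length : Nat) : Int) 1) with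
    | none =>
      simp only [Option.map_none, Int.toNat_natCast]
      have hm1 : ((x :: y :: rest).length + (x :: y :: rest).length - 1) / (x :: y :: rest).length = 1 := by
        apply Nat.div_eq_of_lt_le <;> omega
      have hre := pv_render_eq (x :: y :: rest) (x :: y :: rest).length [0]
        (by rw [hm1]; simp)
      rw [hm1] at hre
      simp only [Nat.cast_one] at hre
      rw [hre, hm1]
    | some p =>
      obtain ⟨n, W⟩ := p
      simp only [Option.map_some]
      obtain ⟨hmem, hWdef⟩ := pvB_find_mem ((x :: y :: rest).map PySem.Str.len)
        (x :: y :: rest).length dw _ (n, W) hB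
      rw [PySem.List.mem_pyRange_one] at hmem
      have h1n : 1 ≤ n := hmem.1
      have hnn : ((n.toNat : Nat) : Int) = n := Int.toNat_of_nonneg (by omega)
      have hWlen : W.length
          = ((x :: y :: rest).length + n.toNat - 1) / n.toNat := by
        simp only [] at hWdef
        rw [hWdef]
        unfold pvB_widths
        rw [List.length_map, List.length_range]
      have hre := pv_render_eq (x :: y :: rest) n.toNat W (le_of_eq hWlen.symm)
      rw [hnn] at hre
      exact hre
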